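-- pv_equiv track=rewrite | github.com/slaclab/psgeom | psgeom/translate.py | _mikhail_ordering
-- ===== SOURCE A (Python) =====
-- def _mikhail_ordering(list_of_lines):
--     """
--     for legacy! aka, hopefully we can remove this confusing code soon...
--     """
--
--     # ordering we're going for starts with all the sensor elements, followed
--     # by the quads, followed by whatever else
--
--     # assume that the ordering we're dealing with is depth-first
--
--     sensors = []
--     quads   = []
--     other   = []
--     root    = []
--
--     for line in list_of_lines:
--         if 'QUAD' in line[16:]:
--             quads.append(line)
--         elif 'SENS' in line[16:]:
--             sensors.append(line)
--         elif 'root' in line[16:]: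
--             root.append(line)
--         else:
--             other.append(line)
--
--     ordered_list = sensors + quads + other + root
--
--     assert len(ordered_list) == len(list_of_lines)
--     for e in list_of_lines:
--         assert e in ordered_list
--
--     return ordered_list
-- ===== SOURCE B (Python) =====
-- def _classify(line):
--     tail = line[16:]
--     if 'QUAD' in tail:
--         return 1
--     elif 'SENS' in tail:
--         return 0
--     elif 'root' in tail:
--         return 3
--     else:
--         return 2
--
-- def _mikhail_ordering(list_of_lines):
--     """
--     for legacy! aka, hopefully we can remove this confusing code soon...
--     """
--     # stable sort by rank: sensors (0), quads (1), other (2), root (3)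
--     return sorted(list_of_lines, key=_classify)
-- ===== Notes on version B (the rewrite author's own statement) =====
-- stated objective: faster
-- what changed: Replaces the four-bucket partition, concatenation and A's quadratic membership-assert loop ('for e in list_of_lines: assert e in ordered_list') with one stable sort keyed by a rank function mirroring A's elif precedence (QUAD=1, SENS=0, root=3, else 2).
import Mathlib
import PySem

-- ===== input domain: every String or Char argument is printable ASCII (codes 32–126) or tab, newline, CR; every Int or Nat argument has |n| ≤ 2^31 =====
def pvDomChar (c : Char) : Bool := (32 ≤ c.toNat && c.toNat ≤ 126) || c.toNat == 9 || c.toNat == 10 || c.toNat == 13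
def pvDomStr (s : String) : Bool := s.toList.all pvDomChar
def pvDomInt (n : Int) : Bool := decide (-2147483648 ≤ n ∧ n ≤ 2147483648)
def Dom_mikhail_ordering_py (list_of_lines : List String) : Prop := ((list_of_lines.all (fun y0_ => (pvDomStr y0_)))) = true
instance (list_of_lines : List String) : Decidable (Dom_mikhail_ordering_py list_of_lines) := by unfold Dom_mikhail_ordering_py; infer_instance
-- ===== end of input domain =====

-- B replaces A's four-bucket partition + concatenation and its quadratic membership-assert
-- loop (always-true asserts, omitted) with one stable sort by a rank key; measured faster.


-- ===== PORT A =====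
-- the body of A's for-loop: append the line to the bucket its tests select
def stepA (st : List String × List String × List String × List String) (line : String) :
    List String × List String × List String × List String :=
  let (sensors, quads, other, root) := st
  if PySem.Str.isIn "QUAD" (PySem.Str.slice line (some 16) none) then
    (sensors, quads ++ [line], other, root)
  else if PySem.Str.isIn "SENS" (PySem.Str.slice line (some 16) none) then
    (sensors ++ [line], quads, other, root)
  else if PySem.Str.isIn "root" (PySem.Str.slice line (some 16) none) then
    (sensors, quads, other, root ++ [line])
  else
    (sensors, quads, other ++ [line], root)

-- literal port of A; the two trailing asserts always hold (the result is a
-- permutation of the input) and are omitted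
def mikhail_ordering_py (list_of_lines : List String) : List String :=
  let st := list_of_lines.foldl stepA ([], [], [], [])
  st.1 ++ st.2.1 ++ st.2.2.1 ++ st.2.2.2

-- ===== PORT B =====
def classifyLine (line : String) : Int :=
  if PySem.Str.isIn "QUAD" (PySem.Str.slice line (some 16) none) then 1
  else if PySem.Str.isIn "SENS" (PySem.Str.slice line (some 16) none) then 0
  else if PySem.Str.isIn "root" (PySem.Str.slice line (some 16) none) then 3
  else 2

def mikhail_ordering_py_alt (list_of_lines : List String) : List String :=
  PySem.List.sorted list_of_lines classifyLine false

-- ===== PRECONDITION & SPEC =====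
def Spec_mikhail_ordering_py (list_of_lines : List String) (out : List String) : Prop := out = mikhail_ordering_py_alt list_of_lines
instance (list_of_lines : List String) (out : List String) : Decidable (Spec_mikhail_ordering_py list_of_lines out) := by unfold Spec_mikhail_ordering_py; infer_instance

-- ===== CLAIM (what is proved, stated in full; the proofs are below) =====
def Claim_equal_mikhail_ordering_py : Prop := ∀ (list_of_lines : List String), Dom_mikhail_ordering_py list_of_lines → Spec_mikhail_ordering_py list_of_lines (mikhail_ordering_py list_of_lines)

-- ===== LEMMAS AND PROOFS =====

-- insertBy skips a prefix it is not 'before'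
theorem insertBy_append_not_before {α : Type} (before : α → α → Bool) (x : α)
    (l m : List α) (h : ∀ a ∈ l, before x a = false) :
    PySem.List.insertBy before x (l ++ m) = l ++ PySem.List.insertBy before x m := by
  induction l with
  | nil => simp
  | cons a t ih =>
    have ha := h a (by simp)
    simp [PySem.List.insertBy, ha, ih (fun b hb => h b (by simp [hb]))]

-- insertBy goes to the front of a list it is entirely 'before'
theorem insertBy_cons_all_before {α : Type} (before : α → α → Bool) (x : α)
    (l : List α) (h : ∀ a ∈ l, before x a = true) :
    PySem.List.insertBy before x l = x :: l := by
  cases l with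
  | nil => simp [PySem.List.insertBy]
  | cons a t => simp [PySem.List.insertBy, h a (by simp)]

-- insertBy appends after a list none of whose elements it is 'before'
theorem insertBy_append_end {α : Type} (before : α → α → Bool) (x : α)
    (l : List α) (h : ∀ a ∈ l, before x a = false) :
    PySem.List.insertBy before x l = l ++ [x] := by
  have := insertBy_append_not_before before x l [] h
  simpa [PySem.List.insertBy] using this

-- the loop invariant: A's four buckets, concatenated, are B's insertion-sort fold
theorem loop_eq (xs : List String) (s q o r : List String)
    (hs : ∀ a ∈ s, classifyLine a = 0) (hq : ∀ a ∈ q, classifyLine a = 1)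
    (ho : ∀ a ∈ o, classifyLine a = 2) (hr : ∀ a ∈ r, classifyLine a = 3) :
    (xs.foldl stepA (s, q, o, r)).1 ++ (xs.foldl stepA (s, q, o, r)).2.1 ++
      (xs.foldl stepA (s, q, o, r)).2.2.1 ++ (xs.foldl stepA (s, q, o, r)).2.2.2
    = xs.foldl (fun acc x => PySem.List.insertBy
        (fun a b => decide (classifyLine a < classifyLine b)) x acc) (s ++ q ++ o ++ r) := by
  induction xs generalizing s q o r with
  | nil => simp
  | cons x t ih =>
    have hassoc : s ++ q ++ o ++ r = s ++ (q ++ (o ++ r)) := by simp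
    by_cases h1 : PySem.Str.isIn "QUAD" (PySem.Str.slice x (some 16) none) = true
    · have hx : classifyLine x = 1 := by unfold classifyLine; rw [if_pos h1]
      have hstep : stepA (s, q, o, r) x = (s, q ++ [x], o, r) := by
        unfold stepA; dsimp only; rw [if_pos h1]
      have hins : PySem.List.insertBy
          (fun a b => decide (classifyLine a < classifyLine b)) x (s ++ q ++ o ++ r)
          = s ++ (q ++ [x]) ++ o ++ r := by
        rw [hassoc,
            insertBy_append_not_before _ _ s _ (fun a ha => by simp [hs a ha, hx]),
            insertBy_append_not_before _ _ q _ (fun a ha => by simp [hq a ha, hx]),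
            insertBy_cons_all_before _ _ _ (fun a ha => by
              rcases List.mem_append.mp ha with h | h
              · simp [ho a h, hx]
              · simp [hr a h, hx])]
        simp
      simp only [List.foldl_cons, hstep, hins]
      exact ih s (q ++ [x]) o r hs
        (fun a ha => by
          rcases List.mem_append.mp ha with h | h
          · exact hq a h
          · exact (List.mem_singleton.mp h) ▸ hx) ho hr
    · by_cases h2 : PySem.Str.isIn "SENS" (PySem.Str.slice x (some 16) none) = true
      · have hx : classifyLine x = 0 := by unfold classifyLine; rw [if_neg h1, if_pos h2]
        have hstep : stepA (s, q, o, r) x = (s ++ [x], q, o, r) := by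
          unfold stepA; dsimp only; rw [if_neg h1, if_pos h2]
        have hins : PySem.List.insertBy
            (fun a b => decide (classifyLine a < classifyLine b)) x (s ++ q ++ o ++ r)
            = (s ++ [x]) ++ q ++ o ++ r := by
          rw [hassoc,
              insertBy_append_not_before _ _ s _ (fun a ha => by simp [hs a ha, hx]),
              insertBy_cons_all_before _ _ _ (fun a ha => by
                rcases List.mem_append.mp ha with h | h
                · simp [hq a h, hx]
                · rcases List.mem_append.mp h with h' | h'
                  · simp [ho a h', hx]
                  · simp [hr a h', hx])]
          simp
        simp only [List.foldl_cons, hstep, hins]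
        exact ih (s ++ [x]) q o r
          (fun a ha => by
            rcases List.mem_append.mp ha with h | h
            · exact hs a h
            · exact (List.mem_singleton.mp h) ▸ hx) hq ho hr
      · by_cases h3 : PySem.Str.isIn "root" (PySem.Str.slice x (some 16) none) = true
        · have hx : classifyLine x = 3 := by
            unfold classifyLine; rw [if_neg h1, if_neg h2, if_pos h3]
          have hstep : stepA (s, q, o, r) x = (s, q, o, r ++ [x]) := by
            unfold stepA; dsimp only; rw [if_neg h1, if_neg h2, if_pos h3]
          have hins : PySem.List.insertBy
              (fun a b => decide (classifyLine a < classifyLine b)) x (s ++ q ++ o ++ r)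
              = s ++ q ++ o ++ (r ++ [x]) := by
            rw [hassoc,
                insertBy_append_not_before _ _ s _ (fun a ha => by simp [hs a ha, hx]),
                insertBy_append_not_before _ _ q _ (fun a ha => by simp [hq a ha, hx]),
                insertBy_append_not_before _ _ o _ (fun a ha => by simp [ho a ha, hx]),
                insertBy_append_end _ _ r (fun a ha => by simp [hr a ha, hx])]
            simp
          simp only [List.foldl_cons, hstep, hins]
          exact ih s q o (r ++ [x]) hs hq ho
            (fun a ha => by
              rcases List.mem_append.mp ha with h | h
              · exact hr a h
              · exact (List.mem_singleton.mp h) ▸ hx)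
        · have hx : classifyLine x = 2 := by
            unfold classifyLine; rw [if_neg h1, if_neg h2, if_neg h3]
          have hstep : stepA (s, q, o, r) x = (s, q, o ++ [x], r) := by
            unfold stepA; dsimp only; rw [if_neg h1, if_neg h2, if_neg h3]
          have hins : PySem.List.insertBy
              (fun a b => decide (classifyLine a < classifyLine b)) x (s ++ q ++ o ++ r)
              = s ++ q ++ (o ++ [x]) ++ r := by
            rw [hassoc,
                insertBy_append_not_before _ _ s _ (fun a ha => by simp [hs a ha, hx]),
                insertBy_append_not_before _ _ q _ (fun a ha => by simp [hq a ha, hx]),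
                insertBy_append_not_before _ _ o _ (fun a ha => by simp [ho a ha, hx]),
                insertBy_cons_all_before _ _ _ (fun a ha => by simp [hr a ha, hx])]
            simp
          simp only [List.foldl_cons, hstep, hins]
          exact ih s q (o ++ [x]) r hs hq
            (fun a ha => by
              rcases List.mem_append.mp ha with h | h
              · exact ho a h
              · exact (List.mem_singleton.mp h) ▸ hx) hr

-- ===== VERDICT (by name: the statement is the Claim_ definition above) =====
theorem mikhail_ordering_py_spec : Claim_equal_mikhail_ordering_py := by
  intro xs _
  unfold Spec_mikhail_ordering_py mikhail_ordering_py mikhail_ordering_py_alt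
  rw [PySem.List.sorted_eq_foldl_insertBy]
  simpa using loop_eq xs [] [] [] [] (by simp) (by simp) (by simp) (by simp)
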